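-- pv_equiv track=rewrite | github.com/Cineg/Advent-of-Code | Day 11 - Cosmic Expansion/expansion.py | distance_horizontal
-- ===== SOURCE A (Python) =====
-- VALUE = 1000000
--
-- def distance_horizontal(
--     map: list[list[str]], row: int, col_start: int, col_end: int
-- ) -> int:
--     if col_end < col_start:
--         col_start, col_end = col_end, col_start
--
--     value: int = 0
--     for col in range(col_start, col_end):
--         if map[row][col] == "X":
--             value += VALUE
--         else:
--             value += 1
--
--     return value
-- ===== SOURCE B (Python) =====
-- VALUE = 1000000
--
-- def distance_horizontal(
--     map: list[list[str]], row: int, col_start: int, col_end: int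
-- ) -> int:
--     lo = min(col_start, col_end)
--     hi = max(col_start, col_end)
--
--     def go(col: int) -> int:
--         if col >= hi:
--             return 0
--         step = VALUE if map[row][col] == "X" else 1
--         return step + go(col + 1)
--
--     return go(lo)
-- ===== Notes on version B (the rewrite author's own statement) =====
-- stated objective: alternative
-- what changed: B replaces A's accumulator loop over range(col_start,col_end) by a direct recursion on the column index (min/max instead of swap, per-cell contribution added on the way back up); same cost.
import Mathlib
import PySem

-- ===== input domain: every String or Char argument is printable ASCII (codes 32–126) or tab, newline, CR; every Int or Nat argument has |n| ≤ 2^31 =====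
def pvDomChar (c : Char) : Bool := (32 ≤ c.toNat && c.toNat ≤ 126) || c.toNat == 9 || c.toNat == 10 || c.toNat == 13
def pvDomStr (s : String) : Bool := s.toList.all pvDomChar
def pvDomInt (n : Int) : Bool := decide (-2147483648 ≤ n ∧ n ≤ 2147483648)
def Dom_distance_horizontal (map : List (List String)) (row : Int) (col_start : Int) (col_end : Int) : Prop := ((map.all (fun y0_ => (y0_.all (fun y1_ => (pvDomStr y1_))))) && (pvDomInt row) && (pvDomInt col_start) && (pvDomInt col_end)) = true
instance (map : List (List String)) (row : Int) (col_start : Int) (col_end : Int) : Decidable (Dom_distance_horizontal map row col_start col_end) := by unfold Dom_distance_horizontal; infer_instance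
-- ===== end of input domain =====

-- B replaces A's accumulator loop by a direct recursion on the column index (min/max instead
-- of swap, per-cell contribution added on the way back up): a different decomposition, same cost.


-- ===== PORT A =====
-- map[row][col]; the default is only reached outside Pre_ (Python raises IndexError there)
def pvCell (map : List (List String)) (row : Int) (col : Int) : String :=
  PySem.List.pyGetD (PySem.List.pyGetD map row []) col ""

def distance_horizontal (map : List (List String)) (row : Int) (col_start : Int) (col_end : Int) : Int :=
  let cs := if col_end < col_start then col_end else col_start
  let ce := if col_end < col_start then col_start else col_end
  (PySem.List.pyRange cs ce 1).foldl
    (fun value col => if pvCell map row col == "X" then value + 1000000 else value + 1) 0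

-- ===== PORT B =====
-- inner helper go(col) of Source B: recursion on the column index up to hi
def pvGo (map : List (List String)) (row : Int) (hi : Int) (col : Int) : Int :=
  if _h : hi ≤ col then 0
  else
    (if pvCell map row col == "X" then (1000000 : Int) else 1) + pvGo map row hi (col + 1)
termination_by (hi - col).toNat
decreasing_by omega

def distance_horizontal_alt (map : List (List String)) (row : Int) (col_start : Int) (col_end : Int) : Int :=
  pvGo map row (max col_start col_end) (min col_start col_end)

-- ===== PRECONDITION & SPEC =====
-- Pre_ excludes exactly the inputs on which A raises IndexError: a non-empty column range
-- with row out of range, or some column index in the range out of range of map[row].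
def Pre_distance_horizontal (map : List (List String)) (row : Int) (col_start : Int) (col_end : Int) : Prop :=
  min col_start col_end < max col_start col_end →
    PySem.Raise.InRange map.length row ∧
    -(((PySem.List.pyGetD map row []).length : Int)) ≤ min col_start col_end ∧
    max col_start col_end ≤ ((PySem.List.pyGetD map row []).length : Int)
instance (map : List (List String)) (row : Int) (col_start : Int) (col_end : Int) : Decidable (Pre_distance_horizontal map row col_start col_end) := by unfold Pre_distance_horizontal; infer_instance

def pvWitness_distance_horizontal : List (List String) × Int × Int × Int :=
  ([["X", ".", "X"], [".", "."]], 0, 0, 3)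

def Spec_distance_horizontal (map : List (List String)) (row : Int) (col_start : Int) (col_end : Int) (out : Int) : Prop := out = distance_horizontal_alt map row col_start col_end
instance (map : List (List String)) (row : Int) (col_start : Int) (col_end : Int) (out : Int) : Decidable (Spec_distance_horizontal map row col_start col_end out) := by unfold Spec_distance_horizontal; infer_instance

-- ===== CLAIM (what is proved, stated in full; the proofs are below) =====
def Claim_equal_distance_horizontal : Prop := ∀ (map : List (List String)) (row : Int) (col_start : Int) (col_end : Int), Dom_distance_horizontal map row col_start col_end → Pre_distance_horizontal map row col_start col_end → Spec_distance_horizontal map row col_start col_end (distance_horizontal map row col_start col_end)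

-- ===== LEMMAS AND PROOFS =====
-- B's recursion unfolded into A's fold over the same range of columns.
theorem pvGo_eq_foldl (map : List (List String)) (row : Int) (hi : Int) (col : Int) (a : Int) :
    a + pvGo map row hi col
      = (PySem.List.pyRange col hi 1).foldl
          (fun value c => if pvCell map row c == "X" then value + 1000000 else value + 1) a := by
  by_cases h : hi ≤ col
  · rw [pvGo, PySem.List.pyRange_one_eq_nil h]
    simp [h]
  · rw [pvGo, PySem.List.pyRange_one_cons (by omega : col < hi)]
    simp only [h, dite_false, List.foldl_cons]
    by_cases hx : pvCell map row col == "X"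
    · simp only [hx, if_true]
      rw [← pvGo_eq_foldl map row hi (col + 1) (a + 1000000)]; ring
    · simp only [hx, Bool.false_eq_true, if_false]
      rw [← pvGo_eq_foldl map row hi (col + 1) (a + 1)]; ring
termination_by (hi - col).toNat
decreasing_by all_goals omega

-- ===== VERDICT (by name: the statement is the Claim_ definition above) =====
theorem distance_horizontal_spec : Claim_equal_distance_horizontal := by
  intro map row col_start col_end _ _
  have h1 : (if col_end < col_start then col_end else col_start) = min col_start col_end := by
    omega
  have h2 : (if col_end < col_start then col_start else col_end) = max col_start col_end := by
    omega
  unfold Spec_distance_horizontal distance_horizontal distance_horizontal_alt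
  simp only [h1, h2]
  rw [← pvGo_eq_foldl map row (max col_start col_end) (min col_start col_end) 0, zero_add]
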